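-- pv_equiv track=rewrite | github.com/ale-mendez/oompaloompa-icft | oompaloompa-icft.py | occ_Nsystem
-- ===== SOURCE A (Python) =====
-- def occ_Nsystem(cfgs,orbs,ncfg,norb):
--     ''' Determines the N electron system (number of electrons per orbital) for the
--         spectroscopic configurations given by "cfgs". '''
--     icfgs=[cfgs[i].split() for i in range(ncfg)]
--     ne_cfgs=[]
--     for i in range(ncfg):
--         ne=[0]*norb
--         for j in icfgs[i]:
--             for k in range(norb):
--                 if j[:-1]==orbs[k]:
--                     ne[k]=int(j[-1])
--         ne_cfgs.append(ne)
--     return ne_cfgs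
-- ===== SOURCE B (Python) =====
-- def occ_Nsystem(cfgs,orbs,ncfg,norb):
--     ''' Determines the N electron system (number of electrons per orbital) for the
--         spectroscopic configurations given by "cfgs". '''
--     ne_cfgs=[]
--     for i in range(ncfg):
--         rtoks=cfgs[i].split()[::-1]
--         ne_cfgs.append([next((int(t[-1]) for t in rtoks if t[:-1]==orbs[k]), 0)
--                         for k in range(norb)])
--     return ne_cfgs
-- ===== Notes on version B (the rewrite author's own statement) =====
-- stated objective: alternative
-- what changed: B is output-driven instead of write-driven: A preallocates a zero vector and, scanning token-by-token with a nested orbital scan, overwrites slots (last write wins); B never mutates a vector - for each configuration it reverses the token list once and builds the row by a comprehension over orbitals, taking the FIRST matching token in the reversed list (equivalent to A's last-write-wins) with default 0.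
import Mathlib
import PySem

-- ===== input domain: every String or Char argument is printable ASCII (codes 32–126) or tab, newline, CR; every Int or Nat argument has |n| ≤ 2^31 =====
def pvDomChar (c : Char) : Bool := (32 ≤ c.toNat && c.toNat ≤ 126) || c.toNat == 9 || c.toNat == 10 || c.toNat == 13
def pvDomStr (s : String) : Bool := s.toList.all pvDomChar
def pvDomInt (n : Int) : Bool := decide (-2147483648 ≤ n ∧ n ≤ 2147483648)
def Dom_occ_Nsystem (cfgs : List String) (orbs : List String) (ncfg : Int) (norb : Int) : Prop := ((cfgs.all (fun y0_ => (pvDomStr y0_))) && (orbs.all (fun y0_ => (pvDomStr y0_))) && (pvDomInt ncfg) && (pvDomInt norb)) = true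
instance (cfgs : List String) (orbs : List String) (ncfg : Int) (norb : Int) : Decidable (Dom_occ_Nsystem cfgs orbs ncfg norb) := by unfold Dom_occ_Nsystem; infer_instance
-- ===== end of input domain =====

-- B is output-driven instead of write-driven: no preallocated vector and no overwrites; each row is a
-- comprehension over orbitals taking the first matching token of the reversed token list (objective: alternative).

-- shared transliterations of expressions both Pythons contain:
-- tok[:-1], tok[-1] (as the 1-char string tok[-1:]), int(...) (total form, Pre_ excludes the raising inputs), orbs[k]
def pvTokPrefix (j : String) : String := PySem.Str.slice j none (some (-1))
def pvTokLast (j : String) : String := PySem.Str.slice j (some (-1)) none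
def pvTokVal (j : String) : Int := (PySem.Int.ofStr? (pvTokLast j)).getD 0
def pvOrbGet (orbs : List String) (k : Int) : String := PySem.List.pyGetD orbs k ""
-- B's  'next((int(t[-1]) for t in rtoks if t[:-1]==orbs[k]), 0)'
def pvFirstMatch (rtoks : List String) (orb : String) : Int :=
  match rtoks.find? (fun t => pvTokPrefix t == orb) with
  | some t => pvTokVal t
  | none => 0

-- ===== PORT A =====
def occ_Nsystem (cfgs : List String) (orbs : List String) (ncfg : Int) (norb : Int) : List (List Int) :=
  let icfgs := (PySem.List.pyRange 0 ncfg 1).map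
    (fun i => PySem.Str.split₀ (PySem.List.pyGetD cfgs i ""))
  (PySem.List.pyRange 0 ncfg 1).foldl (fun ne_cfgs i =>
    let ne := (PySem.List.pyGetD icfgs i []).foldl (fun ne j =>
      (PySem.List.pyRange 0 norb 1).foldl (fun ne k =>
        if pvTokPrefix j = pvOrbGet orbs k then
          PySem.List.pySetD ne k (pvTokVal j)
        else ne) ne) (List.replicate norb.toNat 0)
    ne_cfgs ++ [ne]) []

-- ===== PORT B =====
def occ_Nsystem_alt (cfgs : List String) (orbs : List String) (ncfg : Int) (norb : Int) : List (List Int) :=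
  (PySem.List.pyRange 0 ncfg 1).foldl (fun ne_cfgs i =>
    let rtoks := (PySem.Str.split₀ (PySem.List.pyGetD cfgs i "")).reverse
    ne_cfgs ++ [(PySem.List.pyRange 0 norb 1).map
      (fun k => pvFirstMatch rtoks (pvOrbGet orbs k))]) []

-- ===== PRECONDITION & SPEC =====
-- Pre_ excludes exactly the inputs on which Python A raises: ncfg beyond len(cfgs) (IndexError at
-- cfgs[i]), norb beyond len(orbs) while some used configuration has a token (IndexError at orbs[k]),
-- and a used token matching some orbs[k], k < norb, whose last character is not a digit (ValueError in int).
def Pre_occ_Nsystem (cfgs : List String) (orbs : List String) (ncfg : Int) (norb : Int) : Prop :=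
  ncfg ≤ cfgs.length ∧
  (norb ≤ orbs.length ∨ ∀ cfg ∈ cfgs.take ncfg.toNat, PySem.Str.split₀ cfg = []) ∧
  ∀ cfg ∈ cfgs.take ncfg.toNat, ∀ tok ∈ PySem.Str.split₀ cfg,
    (∃ k ∈ PySem.List.pyRange 0 norb 1, pvTokPrefix tok = pvOrbGet orbs k) →
      ((PySem.Str.pyGet? tok (-1)).map PySem.Chars.isdigit).getD false = true
instance (cfgs : List String) (orbs : List String) (ncfg : Int) (norb : Int) : Decidable (Pre_occ_Nsystem cfgs orbs ncfg norb) := by unfold Pre_occ_Nsystem; infer_instance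

def pvWitness_occ_Nsystem : List String × List String × Int × Int := (["1s2 2s1"], ["1s", "2s"], 1, 2)

def Spec_occ_Nsystem (cfgs : List String) (orbs : List String) (ncfg : Int) (norb : Int) (out : List (List Int)) : Prop := out = occ_Nsystem_alt cfgs orbs ncfg norb
instance (cfgs : List String) (orbs : List String) (ncfg : Int) (norb : Int) (out : List (List Int)) : Decidable (Spec_occ_Nsystem cfgs orbs ncfg norb out) := by unfold Spec_occ_Nsystem; infer_instance

-- ===== CLAIM (what is proved, stated in full; the proofs are below) =====
def Claim_equal_occ_Nsystem : Prop := ∀ (cfgs : List String) (orbs : List String) (ncfg : Int) (norb : Int), Dom_occ_Nsystem cfgs orbs ncfg norb → Pre_occ_Nsystem cfgs orbs ncfg norb → Spec_occ_Nsystem cfgs orbs ncfg norb (occ_Nsystem cfgs orbs ncfg norb)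

-- ===== LEMMAS AND PROOFS =====

theorem pv_range_int (n : Int) :
    PySem.List.pyRange 0 n 1 = (List.range n.toNat).map (fun (k : Nat) => (k : Int)) := by
  simp [PySem.List.pyRange_one]

-- a conditional-write loop over distinct indices, read back pointwise
theorem pv_foldl_set (K : List Nat) (ne : List Int) (c : Nat → Prop) [DecidablePred c]
    (v : Int) (t : Nat) :
    (K.foldl (fun ne k => if c k then ne.set k v else ne) ne)[t]? =
      if t ∈ K ∧ c t then ne[t]?.map (fun _ => v) else ne[t]? := by
  induction K generalizing ne with
  | nil => simp
  | cons k K ih =>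
    simp only [List.foldl_cons, ih, List.mem_cons]
    by_cases ht : t = k
    · subst ht
      by_cases hc : c t <;> by_cases hm : t ∈ K <;>
        simp [hc, hm, List.getElem?_set] <;> cases h : ne[t]? <;>
          simp_all [List.getElem?_eq_some_iff] <;> exact h.choose
    · have hstep : (if c k then ne.set k v else ne)[t]? = ne[t]? := by
        by_cases hck : c k <;> simp [hck, List.getElem?_set_ne (fun h => ht h.symm)]
      rw [hstep]
      simp [ht]

-- one more reversed candidate in front of the first-match scan
theorem pvFirstMatch_cons (rtoks : List String) (j orb : String) :
    pvFirstMatch (j :: rtoks) orb =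
      if pvTokPrefix j = orb then pvTokVal j else pvFirstMatch rtoks orb := by
  simp only [pvFirstMatch, List.find?_cons]
  by_cases h : pvTokPrefix j = orb
  · simp [h]
  · rw [beq_eq_false_iff_ne.mpr h]; simp [h]

-- one configuration: A's token × orbital write loop equals B's reversed first-match row
theorem pv_cfg (orbs : List String) (norb : Int) (toks : List String) :
    toks.foldl (fun ne j => (PySem.List.pyRange 0 norb 1).foldl (fun ne k =>
        if pvTokPrefix j = pvOrbGet orbs k then PySem.List.pySetD ne k (pvTokVal j) else ne) ne)
      (List.replicate norb.toNat 0)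
    = (List.range norb.toNat).map (fun (k : Nat) =>
        pvFirstMatch toks.reverse (pvOrbGet orbs (k : Int))) := by
  induction toks using List.reverseRecOn with
  | nil =>
    simp [pvFirstMatch]
  | append_singleton toks j ih =>
    rw [List.foldl_append, List.foldl_cons, List.foldl_nil, ih]
    rw [pv_range_int]
    simp only [List.foldl_map, PySem.List.pySetD_natCast]
    apply List.ext_getElem?
    intro t
    rw [pv_foldl_set (List.range norb.toNat)
      ((List.range norb.toNat).map fun (k : Nat) => pvFirstMatch toks.reverse (pvOrbGet orbs (k : Int)))
      (fun k => pvTokPrefix j = pvOrbGet orbs (k : Int)) (pvTokVal j) t]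
    by_cases htn : t < norb.toNat
    · by_cases hc : pvTokPrefix j = pvOrbGet orbs (t : Int) <;>
        simp [htn, hc, pvFirstMatch_cons]
    · simp [htn, pvFirstMatch_cons]

-- ===== VERDICT (by name: the statement is the Claim_ definition above) =====
theorem occ_Nsystem_spec : Claim_equal_occ_Nsystem := by
  unfold Claim_equal_occ_Nsystem
  intro cfgs orbs ncfg norb _ _
  unfold Spec_occ_Nsystem occ_Nsystem occ_Nsystem_alt
  rw [PySem.List.foldl_append_singleton_eq_map, PySem.List.foldl_append_singleton_eq_map,
    List.nil_append, List.nil_append]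
  apply List.map_congr_left
  intro i hi
  rw [PySem.List.mem_pyRange_one] at hi
  rw [PySem.List.pyGetD_map_pyRange_of_nonneg _ _ _ _ hi.1 hi.2]
  rw [pv_cfg orbs norb]
  rw [pv_range_int norb, List.map_map]
  simp [Function.comp]
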